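-- pv_equiv track=rewrite | github.com/hecris/cs498 | prob_exp/degree/explain.py | cycle_decomp
-- ===== SOURCE A (Python) =====
-- def cycle_decomp(A):
--     ans = []
--     visited = set()
--     def dfs(i):
--         if i in visited:
--             return 0
--
--         visited.add(i)
--
--         return 1 + dfs(A[i])
--
--     for i in range(len(A)):
--         if i not in visited:
--             ans.append(dfs(i))
--
--     return sorted(ans)
-- ===== SOURCE B (Python) =====
-- def cycle_decomp(A):
--     ans = []
--     visited = set()
--     for i in range(len(A)):
--         if i in visited:
--             continue
--         c = 0
--         j = i
--         while j not in visited: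
--             visited.add(j)
--             c += 1
--             j = A[j]
--         # insert c into ans at its sorted position (ans stays sorted; no final sort)
--         k = 0
--         while k < len(ans) and ans[k] <= c:
--             k += 1
--         ans.insert(k, c)
--     return ans
-- ===== Notes on version B (the rewrite author's own statement) =====
-- stated objective: alternative
-- what changed: Replaces the recursive dfs by an explicit cursor/counter while-loop and replaces the final sorted() call by online insertion of each component size into an always-sorted answer list.
import Mathlib
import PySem

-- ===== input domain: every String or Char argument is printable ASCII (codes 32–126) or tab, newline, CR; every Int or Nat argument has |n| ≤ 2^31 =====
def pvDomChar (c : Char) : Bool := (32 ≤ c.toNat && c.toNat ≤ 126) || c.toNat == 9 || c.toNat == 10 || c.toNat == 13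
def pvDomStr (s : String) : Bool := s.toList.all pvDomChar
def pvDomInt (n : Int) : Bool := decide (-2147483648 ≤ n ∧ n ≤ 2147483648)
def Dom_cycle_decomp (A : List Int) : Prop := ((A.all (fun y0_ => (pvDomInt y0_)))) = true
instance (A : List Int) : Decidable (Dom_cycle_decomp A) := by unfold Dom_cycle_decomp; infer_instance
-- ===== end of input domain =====

-- B replaces A's recursive dfs by an explicit cursor/counter while-loop and replaces the final
-- sorted() by online insertion into an always-sorted answer list (objective: alternative).

-- ===== PORT A =====
-- A's inner dfs: recursion on fuel (2*len+1 suffices: each call adds a fresh int from [-n,n) to visited);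
-- the pyGet? none case (IndexError in Python) is unreachable under Pre_cycle_decomp.
def pvDfsA (A : List Int) : Nat → PySem.Set Int → Int → Int × PySem.Set Int
  | 0, vis, _ => (0, vis)
  | fuel+1, vis, i =>
    if PySem.Set.contains vis i then (0, vis)
    else
      let vis' := PySem.Set.add vis i
      match PySem.List.pyGet? A i with
      | none => (1, vis')       -- IndexError in Python; excluded by Pre_cycle_decomp
      | some j =>
        let r := pvDfsA A fuel vis' j
        (1 + r.1, r.2)

def cycle_decomp (A : List Int) : List Int :=
  let n := A.length
  let st := (PySem.List.pyRange 0 n 1).foldl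
    (fun (st : List Int × PySem.Set Int) (i : Int) =>
      if PySem.Set.contains st.2 i then st
      else
        let r := pvDfsA A (2*n+1) st.2 i
        (st.1 ++ [r.1], r.2))
    ([], PySem.Set.empty)
  PySem.List.sorted st.1 (fun x => x) false

-- ===== PORT B =====
-- B's inner while-loop: cursor j, counter c; same fuel bound as A's dfs.
def pvLoopB (A : List Int) : Nat → PySem.Set Int → Int → Int → Int × PySem.Set Int
  | 0, vis, _, c => (c, vis)
  | fuel+1, vis, j, c =>
    if PySem.Set.contains vis j then (c, vis)
    else
      let vis' := PySem.Set.add vis j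
      match PySem.List.pyGet? A j with
      | none => (c + 1, vis')   -- IndexError in Python; excluded by Pre_cycle_decomp
      | some j' => pvLoopB A fuel vis' j' (c + 1)

-- B's 'find k, ans.insert(k, c)' loop: scan past the elements ≤ c, put c there.
def pvInsSorted (c : Int) : List Int → List Int
  | [] => [c]
  | x :: xs => if x ≤ c then x :: pvInsSorted c xs else c :: x :: xs

-- B's 'for i in range(len(A))' as structural recursion over the index list.
def pvOuterB (A : List Int) : List Int → List Int → PySem.Set Int → List Int
  | [], ans, _ => ans
  | i :: rest, ans, vis =>
    if PySem.Set.contains vis i then pvOuterB A rest ans vis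
    else
      let r := pvLoopB A (2*A.length+1) vis i 0
      pvOuterB A rest (pvInsSorted r.1 ans) r.2

def cycle_decomp_alt (A : List Int) : List Int :=
  pvOuterB A (PySem.List.pyRange 0 A.length 1) [] PySem.Set.empty

-- ===== PRECONDITION & SPEC =====
-- Pre_ excludes exactly the inputs where A raises an IndexError: some successor value lies outside
-- Python's index range [-len(A), len(A)).
def Pre_cycle_decomp (A : List Int) : Prop :=
  ∀ x ∈ A, -(A.length : Int) ≤ x ∧ x < (A.length : Int)
instance (A : List Int) : Decidable (Pre_cycle_decomp A) := by unfold Pre_cycle_decomp; infer_instance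
def pvWitness_cycle_decomp : List Int := [1, 2, 0, -1, 3]
def Spec_cycle_decomp (A : List Int) (out : List Int) : Prop := out = cycle_decomp_alt A
instance (A : List Int) (out : List Int) : Decidable (Spec_cycle_decomp A out) := by unfold Spec_cycle_decomp; infer_instance

-- ===== CLAIM (what is proved, stated in full; the proofs are below) =====
def Claim_equal_cycle_decomp : Prop := ∀ (A : List Int), Dom_cycle_decomp A → Pre_cycle_decomp A → Spec_cycle_decomp A (cycle_decomp A)

-- ===== LEMMAS AND PROOFS =====
-- B's while-loop equals A's dfs: accumulator c plus dfs count, same visited set.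
theorem pvLoopB_eq_dfsA (A : List Int) : ∀ (fuel : Nat) (vis : PySem.Set Int) (j c : Int),
    pvLoopB A fuel vis j c = (c + (pvDfsA A fuel vis j).1, (pvDfsA A fuel vis j).2) := by
  intro fuel
  induction fuel with
  | zero => intro vis j c; simp [pvLoopB, pvDfsA]
  | succ fuel ih =>
    intro vis j c
    simp only [pvLoopB, pvDfsA]
    by_cases h : vis.contains j = true
    · simp only [if_pos h]; simp
    · simp only [if_neg h]
      cases hg : PySem.List.pyGet? A j with
      | none => simp
      | some j' => simp only [ih]; rw [Prod.mk.injEq]; exact ⟨by ring, rfl⟩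

theorem pvInsSorted_perm (c : Int) : ∀ (l : List Int), (pvInsSorted c l).Perm (c :: l) := by
  intro l
  induction l with
  | nil => simp [pvInsSorted]
  | cons x xs ih =>
    simp only [pvInsSorted]
    split_ifs with h
    · exact ((ih.cons x).trans (List.Perm.swap c x xs))
    · exact List.Perm.refl _

theorem pvInsSorted_pairwise (c : Int) : ∀ (l : List Int),
    l.Pairwise (· ≤ ·) → (pvInsSorted c l).Pairwise (· ≤ ·) := by
  intro l
  induction l with
  | nil => intro _; simp [pvInsSorted]
  | cons x xs ih =>
    intro hp
    rcases List.pairwise_cons.1 hp with ⟨hx, hxs⟩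
    simp only [pvInsSorted]
    split_ifs with h
    · refine List.pairwise_cons.2 ⟨?_, ih hxs⟩
      intro y hy
      rcases List.mem_cons.1 ((pvInsSorted_perm c xs).mem_iff.1 hy) with hEq | hy'
      · exact hEq ▸ h
      · exact hx y hy'
    · refine List.pairwise_cons.2 ⟨?_, hp⟩
      intro y hy
      rcases List.mem_cons.1 hy with hEq | hy'
      · exact hEq ▸ le_of_lt (lt_of_not_ge h)
      · exact le_trans (le_of_lt (lt_of_not_ge h)) (hx y hy')

-- inserting into sorted(l) is sorted(l ++ [c])
theorem pvInsSorted_sorted (c : Int) (l : List Int) :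
    PySem.List.sorted (l ++ [c]) (fun x => x) false
      = pvInsSorted c (PySem.List.sorted l (fun x => x) false) := by
  apply PySem.List.sorted_id_eq_of_perm_of_pairwise
  · exact ((pvInsSorted_perm c _).trans
      (((PySem.List.sorted_perm l (fun x => x) false).cons c).trans (List.perm_append_singleton c l).symm))
  · exact pvInsSorted_pairwise c _ (PySem.List.sorted_pairwise l (fun x => x))

-- outer invariant: B's recursion over the index list, starting from sorted(ansA), equals
-- sorted of A's fold result.
theorem pvOuter_eq (A : List Int) : ∀ (L : List Int) (ansA : List Int) (vis : PySem.Set Int),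
    pvOuterB A L (PySem.List.sorted ansA (fun x => x) false) vis
      = PySem.List.sorted
          (L.foldl (fun (st : List Int × PySem.Set Int) (i : Int) =>
            if PySem.Set.contains st.2 i then st
            else
              let r := pvDfsA A (2*A.length+1) st.2 i
              (st.1 ++ [r.1], r.2)) (ansA, vis)).1 (fun x => x) false := by
  intro L
  induction L with
  | nil => intro ansA vis; simp [pvOuterB]
  | cons i rest ih =>
    intro ansA vis
    simp only [pvOuterB, List.foldl_cons]
    by_cases h : vis.contains i = true
    · simp only [if_pos h]; exact ih ansA vis
    · simp only [if_neg h, pvLoopB_eq_dfsA, zero_add]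
      rw [← pvInsSorted_sorted]
      exact ih (ansA ++ [(pvDfsA A (2*A.length+1) vis i).1]) (pvDfsA A (2*A.length+1) vis i).2

-- ===== VERDICT (by name: the statement is the Claim_ definition above) =====
theorem cycle_decomp_spec : Claim_equal_cycle_decomp := by
  intro A _ _
  unfold Spec_cycle_decomp cycle_decomp cycle_decomp_alt
  have := (pvOuter_eq A (PySem.List.pyRange 0 A.length 1) [] PySem.Set.empty).symm
  simpa using this
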